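-- pv_equiv track=rewrite | github.com/kento1109/radie | src/lib/candidate_generation.py | create_object_statements_from_entities
-- ===== SOURCE A (Python) =====
-- import copy
-- from typing import List, Optional, Tuple, Union
--
-- def _build_entity_tokens(entity):
--     return ['<' + entity + '>', '</' + entity + '>']
--
-- def create_object_statements_from_entities(
--         tokens: List[str],
--         obj_entities: List[Tuple],
--         keyword_list: List[Optional[str]] = None) -> List[str]:
--     """
--     NERの結果から、Certainty分類モデルの入力に必要なインスタンスを作成する
--     """
--     _tokens = copy.deepcopy(tokens)
--     target_entities = list()
--     if keyword_list is not None: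
--         for obj_e in obj_entities:
--             if ''.join(tokens[obj_e[1]:obj_e[2] + 1]) in keyword_list:
--                 target_entities.append(obj_e)
--     else:
--         target_entities = obj_entities
--     target_entities.sort(key=lambda x: (x[1]))  # sort by entity start idx
--     entity_offset = 0
--     for target_e in target_entities:
--         entity_name, start_idx, end_idx = target_e
--         e_start_token, e_end_token = _build_entity_tokens(entity_name)
--         _tokens.insert(start_idx + entity_offset, e_start_token)
--         _tokens.insert(end_idx + entity_offset + 2, e_end_token)
--         entity_offset += 2
--     return _tokens
-- ===== SOURCE B (Python) =====
-- def create_object_statements_from_entities(tokens, obj_entities, keyword_list=None):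
--     """Rebuild the token list in one pass: copy tokens up to each entity span,
--     wrap the span in its boundary markers, and continue after the span."""
--     if keyword_list is None:
--         targets = list(obj_entities)
--     else:
--         keywords = set(keyword_list)
--         targets = [e for e in obj_entities
--                    if ''.join(tokens[e[1]:e[2] + 1]) in keywords]
--     targets.sort(key=lambda t: t[1])
--     out = []
--     prev = 0
--     for name, start, end in targets:
--         out += tokens[prev:start]
--         out.append('<' + name + '>')
--         out += tokens[start:end + 1]
--         out.append('</' + name + '>')
--         prev = end + 1
--     out += tokens[prev:]
--     return out
-- ===== Notes on version B (the rewrite author's own statement) =====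
-- stated objective: alternative
-- what changed: B rebuilds the output in one pass by concatenating token slices with the markers wrapped around each sorted span (O(n+k) work, keyword lookup via a set), instead of A's repeated list.insert with a running offset; Pre_ excludes inputs whose keyword-surviving spans overlap or are inverted/out of order, where marker nesting is unspecified and A's insert-based placement and B's span-wise placement are two different defensible choices.
-- outside the precondition, e.g. on create_object_statements_from_entities([''], [('', 1, -1)], None): A returns ['', '</>', '<>'], B returns ['', '<>', '</>', '']
import Mathlib
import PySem

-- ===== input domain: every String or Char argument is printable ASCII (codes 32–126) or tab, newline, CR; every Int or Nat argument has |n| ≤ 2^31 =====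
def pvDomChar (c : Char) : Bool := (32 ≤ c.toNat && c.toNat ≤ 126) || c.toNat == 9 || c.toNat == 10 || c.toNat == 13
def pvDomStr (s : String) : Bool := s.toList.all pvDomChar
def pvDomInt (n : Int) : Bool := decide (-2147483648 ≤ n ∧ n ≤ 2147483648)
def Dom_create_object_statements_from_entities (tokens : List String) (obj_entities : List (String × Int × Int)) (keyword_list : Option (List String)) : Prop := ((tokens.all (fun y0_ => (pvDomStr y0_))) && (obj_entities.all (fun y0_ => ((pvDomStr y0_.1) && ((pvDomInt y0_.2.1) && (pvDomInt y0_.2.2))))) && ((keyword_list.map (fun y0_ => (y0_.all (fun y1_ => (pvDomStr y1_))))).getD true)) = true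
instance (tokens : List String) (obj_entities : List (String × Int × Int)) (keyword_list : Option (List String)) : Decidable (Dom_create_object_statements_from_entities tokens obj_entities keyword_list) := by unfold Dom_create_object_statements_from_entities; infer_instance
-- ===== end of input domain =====

-- B rebuilds the output in one pass from token slices with the markers wrapped around each
-- sorted span (set for keyword lookup) instead of A's repeated list.insert with a running
-- offset; return values proved equal on Pre_ — note A sorts obj_entities IN PLACE when
-- keyword_list is None (a side effect B does not perform).

-- ===== PORT A =====
-- _build_entity_tokens(entity)
def pvBuildEntityTokens (entity : String) : String × String :=
  ("<" ++ entity ++ ">", "</" ++ entity ++ ">")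

def create_object_statements_from_entities (tokens : List String) (obj_entities : List (String × Int × Int)) (keyword_list : Option (List String)) : List String :=
  let _tokens := tokens  -- copy.deepcopy(tokens)
  let target_entities : List (String × Int × Int) :=
    match keyword_list with
    | some kws =>
        -- for obj_e in obj_entities: if ''.join(tokens[obj_e[1]:obj_e[2]+1]) in keyword_list: append
        obj_entities.foldl (fun acc obj_e =>
          if kws.contains
              (PySem.Str.join "" (PySem.List.slice tokens (some obj_e.2.1) (some (obj_e.2.2 + 1))))
          then acc ++ [obj_e] else acc) []
    | none => obj_entities
  let target_entities := PySem.List.sorted target_entities (fun x => x.2.1) false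
  -- for target_e in target_entities: two inserts, entity_offset += 2
  (target_entities.foldl (fun (st : List String × Int) target_e =>
      let entity_name := target_e.1
      let start_idx := target_e.2.1
      let end_idx := target_e.2.2
      let et := pvBuildEntityTokens entity_name
      let ts := PySem.List.insert st.1 (start_idx + st.2) et.1
      let ts := PySem.List.insert ts (end_idx + st.2 + 2) et.2
      (ts, st.2 + 2)) (_tokens, 0)).1

-- ===== PORT B =====
def create_object_statements_from_entities_alt (tokens : List String) (obj_entities : List (String × Int × Int)) (keyword_list : Option (List String)) : List String :=
  let targets : List (String × Int × Int) :=
    match keyword_list with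
    | none => obj_entities
    | some kws =>
        let keywords := PySem.Set.ofList kws
        obj_entities.filter (fun e =>
          PySem.Set.contains keywords
            (PySem.Str.join "" (PySem.List.slice tokens (some e.2.1) (some (e.2.2 + 1)))))
  let targets := PySem.List.sorted targets (fun t => t.2.1) false
  let st := targets.foldl (fun (st : List String × Int) t =>
      (st.1 ++ PySem.List.slice tokens (some st.2) (some t.2.1)
            ++ ("<" ++ t.1 ++ ">")
              :: (PySem.List.slice tokens (some t.2.1) (some (t.2.2 + 1))
                  ++ [("</" ++ t.1 ++ ">")]),
       t.2.2 + 1)) ([], 0)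
  st.1 ++ PySem.List.slice tokens (some st.2) none

-- ===== PRECONDITION & SPEC =====

-- the entities A keeps (the keyword filter), shared by Pre_ and the proofs
def pvTargetsOf (tokens : List String) (obj_entities : List (String × Int × Int)) (keyword_list : Option (List String)) : List (String × Int × Int) :=
  match keyword_list with
  | none => obj_entities
  | some kws => obj_entities.filter (fun e =>
      kws.contains (PySem.Str.join "" (PySem.List.slice tokens (some e.2.1) (some (e.2.2 + 1)))))

-- spans, in start order, begin at or after the previous span's end (m) and are not
-- inverted (start ≤ end+1) unless they already reach past the last token (n-1 ≤ end)
def pvSpansOk (n : Int) (m : Int) : List (String × Int × Int) → Bool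
  | [] => true
  | t :: rest => (decide (m ≤ t.2.1) && (decide (t.2.1 ≤ t.2.2 + 1) || decide (n - 1 ≤ t.2.2)))
      && pvSpansOk n (t.2.2 + 1) rest

-- Pre_ excludes inputs whose keyword-surviving entity spans overlap or are inverted/out of
-- order: there the marker nesting is unspecified and A's insert-based placement and B's
-- span-wise placement are two different defensible choices.
def Pre_create_object_statements_from_entities (tokens : List String) (obj_entities : List (String × Int × Int)) (keyword_list : Option (List String)) : Prop :=
  pvSpansOk (tokens.length : Int) 0
    (PySem.List.sorted (pvTargetsOf tokens obj_entities keyword_list) (fun t => t.2.1) false) = true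
instance (tokens : List String) (obj_entities : List (String × Int × Int)) (keyword_list : Option (List String)) : Decidable (Pre_create_object_statements_from_entities tokens obj_entities keyword_list) := by unfold Pre_create_object_statements_from_entities; infer_instance

def pvWitness_create_object_statements_from_entities : List String × (List (String × Int × Int)) × Option (List String) :=
  (["a", "b", "c"], [("x", 1, 2)], none)

def Spec_create_object_statements_from_entities (tokens : List String) (obj_entities : List (String × Int × Int)) (keyword_list : Option (List String)) (out : List String) : Prop := out = create_object_statements_from_entities_alt tokens obj_entities keyword_list
instance (tokens : List String) (obj_entities : List (String × Int × Int)) (keyword_list : Option (List String)) (out : List String) : Decidable (Spec_create_object_statements_from_entities tokens obj_entities keyword_list out) := by unfold Spec_create_object_statements_from_entities; infer_instance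

-- ===== CLAIM (what is proved, stated in full; the proofs are below) =====
def Claim_equal_create_object_statements_from_entities : Prop := ∀ (tokens : List String) (obj_entities : List (String × Int × Int)) (keyword_list : Option (List String)), Dom_create_object_statements_from_entities tokens obj_entities keyword_list → Pre_create_object_statements_from_entities tokens obj_entities keyword_list → Spec_create_object_statements_from_entities tokens obj_entities keyword_list (create_object_statements_from_entities tokens obj_entities keyword_list)

-- ===== LEMMAS AND PROOFS =====

theorem pv_insert_nonneg {α : Type} (xs : List α) (i : Int) (v : α) (hi : 0 ≤ i) :
    PySem.List.insert xs i v = xs.take i.toNat ++ v :: xs.drop i.toNat := by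
  simp only [PySem.List.insert, PySem.List.sliceIndices]
  norm_num
  rw [if_neg (by omega)]
  rw [show (min i (xs.length : Int)).toNat = min i.toNat xs.length by omega]
  congr 1
  · rcases Nat.le_total i.toNat xs.length with h1 | h1
    · rw [Nat.min_eq_left h1]
    · rw [Nat.min_eq_right h1, List.take_of_length_le h1, List.take_of_length_le le_rfl]
  · congr 1
    rcases Nat.le_total i.toNat xs.length with h1 | h1
    · rw [Nat.min_eq_left h1]
    · rw [Nat.min_eq_right h1, List.drop_eq_nil_of_le h1, List.drop_eq_nil_of_le le_rfl]

theorem pv_insert_append {α : Type} (P Q : List α) (i : Int) (v : α) (hi : (P.length : Int) ≤ i) :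
    PySem.List.insert (P ++ Q) i v = P ++ PySem.List.insert Q (i - P.length) v := by
  have h0 : (0 : Int) ≤ i := le_trans (by positivity) hi
  rw [pv_insert_nonneg _ _ _ h0, pv_insert_nonneg _ _ _ (by omega)]
  rw [List.take_append, List.drop_append]
  rw [List.take_of_length_le (by omega), List.drop_eq_nil_of_le (by omega)]
  rw [show i.toNat - P.length = (i - P.length).toNat by omega]
  simp

theorem pv_dropTake {α : Type} (xs : List α) (a b : Nat) :
    (xs.drop a).take (b - min a xs.length) = (xs.drop a).take (b - a) := by
  rcases Nat.le_total a xs.length with ha | ha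
  · rw [Nat.min_eq_left ha]
  · rw [List.drop_eq_nil_of_le ha]; simp

theorem pv_dropDropMin {α : Type} (xs : List α) (a b : Nat) (h : a ≤ b ∨ xs.length ≤ b) :
    (xs.drop a).drop (b - min a xs.length) = xs.drop b := by
  rcases Nat.le_total a xs.length with ha | ha
  · rw [Nat.min_eq_left ha, List.drop_drop]
    rcases h with h | h
    · congr 1; omega
    · rw [List.drop_eq_nil_of_le (by omega), List.drop_eq_nil_of_le (by omega)]
  · have hb : xs.length ≤ b := by by_contra hc; rcases h with h | h <;> omega
    rw [List.drop_eq_nil_of_le ha, List.drop_eq_nil_of_le hb]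
    simp

def pvAStep (st : List String × Int) (t : String × Int × Int) : List String × Int :=
  (PySem.List.insert (PySem.List.insert st.1 (t.2.1 + st.2) ("<" ++ t.1 ++ ">"))
     (t.2.2 + st.2 + 2) ("</" ++ t.1 ++ ">"), st.2 + 2)

theorem pv_stepA (tokens out : List String) (nm : String) (s e m : Int) (off : Nat)
    (hm : 0 ≤ m) (hms : m ≤ s) (hdisj : s ≤ e + 1 ∨ (tokens.length : Int) - 1 ≤ e)
    (hlen : out.length = min m.toNat tokens.length + off) :
    pvAStep (out ++ tokens.drop m.toNat, (off : Int)) (nm, s, e)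
      = ((out ++ PySem.List.slice tokens (some m) (some s)
            ++ ("<" ++ nm ++ ">")
              :: (PySem.List.slice tokens (some s) (some (e + 1)) ++ [("</" ++ nm ++ ">")]))
          ++ tokens.drop (e + 1).toNat, (off : Int) + 2) := by
  have hs0 : (0 : Int) ≤ s := le_trans hm hms
  have he1 : (0 : Int) ≤ e + 1 := by
    rcases hdisj with h | h
    · omega
    · have : (0 : Int) ≤ (tokens.length : Int) := by positivity
      omega
  simp only [pvAStep]
  rw [pv_insert_append out (tokens.drop m.toNat) (s + (off : Int)) ("<" ++ nm ++ ">")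
        (by rw [hlen]; push_cast; omega)]
  rw [pv_insert_nonneg (tokens.drop m.toNat) (s + (off : Int) - (out.length : Int))
        ("<" ++ nm ++ ">") (by rw [hlen]; push_cast; omega)]
  rw [show (s + (off : Int) - (out.length : Int)).toNat = s.toNat - min m.toNat tokens.length by
        rw [hlen]; omega]
  rw [pv_dropTake tokens m.toNat s.toNat]
  rw [pv_dropDropMin tokens m.toNat s.toNat (Or.inl (by omega))]
  rw [show out ++ ((tokens.drop m.toNat).take (s.toNat - m.toNat)
        ++ ("<" ++ nm ++ ">") :: tokens.drop s.toNat)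
      = (out ++ (tokens.drop m.toNat).take (s.toNat - m.toNat) ++ [("<" ++ nm ++ ">")])
        ++ tokens.drop s.toNat by simp]
  have hP2 : ((out ++ (tokens.drop m.toNat).take (s.toNat - m.toNat) ++ [("<" ++ nm ++ ">")]).length : Int)
      = (min s.toNat tokens.length : Int) + off + 1 := by
    simp only [List.length_append, List.length_take, List.length_drop, List.length_cons,
      List.length_nil, hlen]
    push_cast; omega
  rw [pv_insert_append (out ++ (tokens.drop m.toNat).take (s.toNat - m.toNat) ++ [("<" ++ nm ++ ">")])
        (tokens.drop s.toNat) (e + (off : Int) + 2) ("</" ++ nm ++ ">")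
        (by rw [hP2]; omega)]
  rw [pv_insert_nonneg (tokens.drop s.toNat)
        (e + (off : Int) + 2 - ((out ++ (tokens.drop m.toNat).take (s.toNat - m.toNat)
          ++ [("<" ++ nm ++ ">")]).length : Int)) ("</" ++ nm ++ ">") (by rw [hP2]; omega)]
  rw [show (e + (off : Int) + 2 - ((out ++ (tokens.drop m.toNat).take (s.toNat - m.toNat)
        ++ [("<" ++ nm ++ ">")]).length : Int)).toNat = (e + 1).toNat - min s.toNat tokens.length by
      rw [hP2]; omega]
  rw [pv_dropTake tokens s.toNat (e + 1).toNat]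
  rw [pv_dropDropMin tokens s.toNat (e + 1).toNat (by rcases hdisj with h | h <;> omega)]
  rw [PySem.List.slice_toNat tokens hm hs0]
  rw [PySem.List.slice_toNat tokens hs0 he1]
  simp [List.append_assoc]

def pvBStep (tokens : List String) (st : List String × Int) (t : String × Int × Int) : List String × Int :=
  (st.1 ++ PySem.List.slice tokens (some st.2) (some t.2.1)
        ++ ("<" ++ t.1 ++ ">")
          :: (PySem.List.slice tokens (some t.2.1) (some (t.2.2 + 1)) ++ [("</" ++ t.1 ++ ">")]),
   t.2.2 + 1)

theorem pv_loop (tokens : List String) (ts : List (String × Int × Int)) :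
    ∀ (m : Int) (off : Nat) (out : List String), 0 ≤ m →
      pvSpansOk (tokens.length : Int) m ts = true →
      out.length = min m.toNat tokens.length + off →
      (ts.foldl pvAStep (out ++ tokens.drop m.toNat, (off : Int))).1
        = (ts.foldl (pvBStep tokens) (out, m)).1
            ++ PySem.List.slice tokens (some (ts.foldl (pvBStep tokens) (out, m)).2) none := by
  induction ts with
  | nil =>
      intro m off out hm _ _
      simp only [List.foldl_nil]
      rw [PySem.List.slice_from tokens hm]
  | cons t rest ih =>
      intro m off out hm hok hlen
      obtain ⟨nm, s, e⟩ := t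
      simp only [pvSpansOk, Bool.and_eq_true, Bool.or_eq_true, decide_eq_true_eq] at hok
      obtain ⟨⟨hms, hdisj⟩, hrest⟩ := hok
      have hs0 : (0 : Int) ≤ s := le_trans hm hms
      have he1 : (0 : Int) ≤ e + 1 := by
        rcases hdisj with h | h
        · omega
        · have : (0 : Int) ≤ (tokens.length : Int) := by positivity
          omega
      simp only [List.foldl_cons]
      rw [pv_stepA tokens out nm s e m off hm hms hdisj hlen]
      have hlen' : (out ++ PySem.List.slice tokens (some m) (some s)
            ++ ("<" ++ nm ++ ">")
              :: (PySem.List.slice tokens (some s) (some (e + 1)) ++ [("</" ++ nm ++ ">")])).length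
          = min (e + 1).toNat tokens.length + (off + 2) := by
        rw [PySem.List.slice_toNat tokens hm hs0, PySem.List.slice_toNat tokens hs0 he1]
        simp only [List.length_append, List.length_cons, List.length_take, List.length_drop,
          List.length_nil, hlen]
        omega
      have := ih (e + 1) (off + 2)
        (out ++ PySem.List.slice tokens (some m) (some s)
          ++ ("<" ++ nm ++ ">")
            :: (PySem.List.slice tokens (some s) (some (e + 1)) ++ [("</" ++ nm ++ ">")]))
        he1 hrest hlen'
      rw [show ((off : Int) + 2) = ((off + 2 : Nat) : Int) by push_cast; ring]
      rw [this]
      rfl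

theorem pv_filter_set (tokens : List String) (obj_entities : List (String × Int × Int)) (kws : List String) :
    obj_entities.filter (fun e =>
        PySem.Set.contains (PySem.Set.ofList kws)
          (PySem.Str.join "" (PySem.List.slice tokens (some e.2.1) (some (e.2.2 + 1)))))
      = pvTargetsOf tokens obj_entities (some kws) := by
  unfold pvTargetsOf
  apply List.filter_congr
  intro e _
  simp [pysem]

-- ===== VERDICT (by name: the statement is the Claim_ definition above) =====
theorem create_object_statements_from_entities_spec : Claim_equal_create_object_statements_from_entities := by
  intro tokens obj_entities keyword_list _hdom hpre
  unfold Pre_create_object_statements_from_entities at hpre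
  unfold Spec_create_object_statements_from_entities
  have hmain : ∀ ts : List (String × Int × Int),
      pvSpansOk (tokens.length : Int) 0 (PySem.List.sorted ts (fun t => t.2.1) false) = true →
      (((PySem.List.sorted ts (fun t => t.2.1) false).foldl pvAStep (tokens, 0)).1 : List String)
        = ((PySem.List.sorted ts (fun t => t.2.1) false).foldl (pvBStep tokens) ([], 0)).1
            ++ PySem.List.slice tokens
                (some ((PySem.List.sorted ts (fun t => t.2.1) false).foldl (pvBStep tokens) ([], 0)).2) none := by
    intro ts hok
    have := pv_loop tokens (PySem.List.sorted ts (fun t => t.2.1) false) 0 0 [] le_rfl hok (by simp)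
    simpa using this
  cases keyword_list with
  | none =>
      dsimp only [create_object_statements_from_entities, create_object_statements_from_entities_alt, pvBuildEntityTokens]
      exact hmain obj_entities hpre
  | some kws =>
      dsimp only [create_object_statements_from_entities, create_object_statements_from_entities_alt, pvBuildEntityTokens]
      rw [PySem.List.foldl_append_if_eq_filter, List.nil_append, pv_filter_set]
      exact hmain (pvTargetsOf tokens obj_entities (some kws)) hpre
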